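-- pv_equiv track=rewrite | github.com/shresth-keshari/CodewarsV5 | responses_sort/Upload google drive link that has your script ( Only the .py file that has your script) (File responses)/Jyotirya - Jyotirya Agrawal.py | calculate_initial_score
-- ===== SOURCE A (Python) =====
-- def calculate_initial_score(troops):
--     score = 0
--     for troop in troops :
--         if troop["name"] == "Archer":
--             score += 3
--         elif troop["name"] == "Minion":
--             score += 3
--         elif troop["name"] == "Knight":
--             score += 3
--         elif troop["name"] == "Skeleton":
--             score += 3
--         elif troop["name"] == "Barbarian":
--             score += 3
--         elif troop["name"] == "Dragon":
--             score += 4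
--         elif troop["name"] == "Valkyrie":
--             score += 4
--         elif troop["name"] == "Musketeer":
--             score += 4
--         elif troop["name"] == "Giant":
--             score += 5
--         elif troop["name"] == "Prince":
--             score += 5
--         elif troop["name"] == "Balloon":
--             score += 5
--         elif troop["name"] == "Wizard":
--             score += 6
--     return score
-- ===== SOURCE B (Python) =====
-- POINTS = {"Archer": 3, "Minion": 3, "Knight": 3, "Skeleton": 3, "Barbarian": 3,
--           "Dragon": 4, "Valkyrie": 4, "Musketeer": 4,
--           "Giant": 5, "Prince": 5, "Balloon": 5, "Wizard": 6}
--
-- def calculate_initial_score(troops):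
--     counts = {}
--     for troop in troops:
--         n = troop["name"]
--         counts[n] = counts.get(n, 0) + 1
--     return sum(pts * counts.get(name, 0) for name, pts in POINTS.items())
-- ===== Notes on version B (the rewrite author's own statement) =====
-- stated objective: alternative
-- what changed: Replaces the per-troop 12-way if-elif scan by building a name-frequency dict in one pass and then summing points*count over the fixed points table.
import Mathlib
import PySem

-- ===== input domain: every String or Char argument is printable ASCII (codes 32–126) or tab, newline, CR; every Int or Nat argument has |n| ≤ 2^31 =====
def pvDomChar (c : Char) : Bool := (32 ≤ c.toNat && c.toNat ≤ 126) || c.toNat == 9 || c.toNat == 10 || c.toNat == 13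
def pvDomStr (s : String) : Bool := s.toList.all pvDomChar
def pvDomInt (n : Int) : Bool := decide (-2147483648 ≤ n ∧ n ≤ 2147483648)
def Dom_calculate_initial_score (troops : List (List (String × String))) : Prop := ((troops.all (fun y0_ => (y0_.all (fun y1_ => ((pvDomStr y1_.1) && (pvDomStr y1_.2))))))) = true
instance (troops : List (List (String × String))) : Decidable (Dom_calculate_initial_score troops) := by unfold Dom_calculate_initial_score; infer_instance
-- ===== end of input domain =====

-- B replaces A's per-troop 12-way if-elif scan by a one-pass name-frequency dict
-- followed by a sum of points*count over the fixed points table (same cost, different shape).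

-- ===== PORT A =====
-- troop["name"]; Pre_ guarantees the key exists, so getD "" never fires on admitted inputs
def pvName (troop : List (String × String)) : String :=
  ((PySem.Dict.mk troop).get? "name").getD ""

def calculate_initial_score (troops : List (List (String × String))) : Int :=
  troops.foldl (fun score troop =>
    if pvName troop = "Archer" then score + 3
    else if pvName troop = "Minion" then score + 3
    else if pvName troop = "Knight" then score + 3
    else if pvName troop = "Skeleton" then score + 3
    else if pvName troop = "Barbarian" then score + 3
    else if pvName troop = "Dragon" then score + 4
    else if pvName troop = "Valkyrie" then score + 4
    else if pvName troop = "Musketeer" then score + 4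
    else if pvName troop = "Giant" then score + 5
    else if pvName troop = "Prince" then score + 5
    else if pvName troop = "Balloon" then score + 5
    else if pvName troop = "Wizard" then score + 6
    else score) 0

-- ===== PORT B =====
-- troop["name"] on B's side
def pvNameB (troop : List (String × String)) : String :=
  ((PySem.Dict.mk troop).get? "name").getD ""

def pvPOINTS : List (String × Int) :=
  [("Archer", 3), ("Minion", 3), ("Knight", 3), ("Skeleton", 3), ("Barbarian", 3),
   ("Dragon", 4), ("Valkyrie", 4), ("Musketeer", 4),
   ("Giant", 5), ("Prince", 5), ("Balloon", 5), ("Wizard", 6)]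

def calculate_initial_score_alt (troops : List (List (String × String))) : Int :=
  let counts : PySem.Dict String Int :=
    troops.foldl (fun d troop => d.insert (pvNameB troop) (d.getD (pvNameB troop) 0 + 1))
      PySem.Dict.empty
  pvPOINTS.foldl (fun s p => s + p.2 * counts.getD p.1 0) 0

-- ===== PRECONDITION & SPEC =====
-- Pre_ excludes exactly the inputs where Python A raises KeyError: a troop dict with no "name" key.
def Pre_calculate_initial_score (troops : List (List (String × String))) : Prop :=
  ∀ t ∈ troops, (PySem.Dict.mk t).contains "name" = true
instance (troops : List (List (String × String))) : Decidable (Pre_calculate_initial_score troops) := by unfold Pre_calculate_initial_score; infer_instance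

def pvWitness_calculate_initial_score : (List (List (String × String))) :=
  [[("name", "Wizard")], [("name", "Goblin")], [("name", "Giant")]]

def Spec_calculate_initial_score (troops : List (List (String × String))) (out : Int) : Prop := out = calculate_initial_score_alt troops
instance (troops : List (List (String × String))) (out : Int) : Decidable (Spec_calculate_initial_score troops out) := by unfold Spec_calculate_initial_score; infer_instance

-- ===== CLAIM (what is proved, stated in full; the proofs are below) =====
def Claim_equal_calculate_initial_score : Prop := ∀ (troops : List (List (String × String))), Dom_calculate_initial_score troops → Pre_calculate_initial_score troops → Spec_calculate_initial_score troops (calculate_initial_score troops)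

-- ===== LEMMAS AND PROOFS =====

-- A's per-troop step value as a function of the name
def pvStep (n : String) : Int :=
  if n = "Archer" then 3 else if n = "Minion" then 3 else if n = "Knight" then 3
  else if n = "Skeleton" then 3 else if n = "Barbarian" then 3 else if n = "Dragon" then 4
  else if n = "Valkyrie" then 4 else if n = "Musketeer" then 4 else if n = "Giant" then 5
  else if n = "Prince" then 5 else if n = "Balloon" then 5 else if n = "Wizard" then 6 else 0

lemma stepA_eq (score : Int) (troop : List (String × String)) :
    (if pvName troop = "Archer" then score + 3
    else if pvName troop = "Minion" then score + 3
    else if pvName troop = "Knight" then score + 3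
    else if pvName troop = "Skeleton" then score + 3
    else if pvName troop = "Barbarian" then score + 3
    else if pvName troop = "Dragon" then score + 4
    else if pvName troop = "Valkyrie" then score + 4
    else if pvName troop = "Musketeer" then score + 4
    else if pvName troop = "Giant" then score + 5
    else if pvName troop = "Prince" then score + 5
    else if pvName troop = "Balloon" then score + 5
    else if pvName troop = "Wizard" then score + 6
    else score) = score + pvStep (pvName troop) := by
  unfold pvStep
  by_cases h1 : pvName troop = "Archer"
  · simp only [if_pos h1]
  · by_cases h2 : pvName troop = "Minion"
    · simp only [if_neg h1, if_pos h2]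
    · by_cases h3 : pvName troop = "Knight"
      · simp only [if_neg h1, if_neg h2, if_pos h3]
      · by_cases h4 : pvName troop = "Skeleton"
        · simp only [if_neg h1, if_neg h2, if_neg h3, if_pos h4]
        · by_cases h5 : pvName troop = "Barbarian"
          · simp only [if_neg h1, if_neg h2, if_neg h3, if_neg h4, if_pos h5]
          · by_cases h6 : pvName troop = "Dragon"
            · simp only [if_neg h1, if_neg h2, if_neg h3, if_neg h4, if_neg h5, if_pos h6]
            · by_cases h7 : pvName troop = "Valkyrie"
              · simp only [if_neg h1, if_neg h2, if_neg h3, if_neg h4, if_neg h5, if_neg h6, if_pos h7]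
              · by_cases h8 : pvName troop = "Musketeer"
                · simp only [if_neg h1, if_neg h2, if_neg h3, if_neg h4, if_neg h5, if_neg h6, if_neg h7, if_pos h8]
                · by_cases h9 : pvName troop = "Giant"
                  · simp only [if_neg h1, if_neg h2, if_neg h3, if_neg h4, if_neg h5, if_neg h6, if_neg h7, if_neg h8, if_pos h9]
                  · by_cases h10 : pvName troop = "Prince"
                    · simp only [if_neg h1, if_neg h2, if_neg h3, if_neg h4, if_neg h5, if_neg h6, if_neg h7, if_neg h8, if_neg h9, if_pos h10]
                    · by_cases h11 : pvName troop = "Balloon"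
                      · simp only [if_neg h1, if_neg h2, if_neg h3, if_neg h4, if_neg h5, if_neg h6, if_neg h7, if_neg h8, if_neg h9, if_neg h10, if_pos h11]
                      · by_cases h12 : pvName troop = "Wizard"
                        · simp only [if_neg h1, if_neg h2, if_neg h3, if_neg h4, if_neg h5, if_neg h6, if_neg h7, if_neg h8, if_neg h9, if_neg h10, if_neg h11, if_pos h12]
                        · simp only [if_neg h1, if_neg h2, if_neg h3, if_neg h4, if_neg h5, if_neg h6, if_neg h7, if_neg h8, if_neg h9, if_neg h10, if_neg h11, if_neg h12]; omega

lemma portA_eq_sum (troops : List (List (String × String))) :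
    calculate_initial_score troops = ((troops.map pvName).map pvStep).sum := by
  unfold calculate_initial_score
  simp only [stepA_eq]
  rw [show (fun (score : Int) troop => score + pvStep (pvName troop))
        = (fun (score : Int) troop => score + (pvStep ∘ pvName) troop) from rfl,
    PySem.List.foldl_add]
  simp [List.map_map]

-- the counts dict is Counter(names)
lemma counts_eq_counter (troops : List (List (String × String))) :
    troops.foldl (fun d troop => d.insert (pvNameB troop) (d.getD (pvNameB troop) 0 + 1))
      PySem.Dict.empty = PySem.Dict.counter (troops.map pvName) := by
  rw [← PySem.Dict.foldl_insert_getD_add_one_eq_counter, List.foldl_map]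
  rfl

-- the table sum of points * indicator equals pvStep
lemma table_indicator (n : String) :
    (pvPOINTS.map (fun p => p.2 * (if n = p.1 then (1:Int) else 0))).sum = pvStep n := by
  by_cases h1 : n = "Archer"
  · subst h1; decide
  · by_cases h2 : n = "Minion"
    · subst h2; decide
    · by_cases h3 : n = "Knight"
      · subst h3; decide
      · by_cases h4 : n = "Skeleton"
        · subst h4; decide
        · by_cases h5 : n = "Barbarian"
          · subst h5; decide
          · by_cases h6 : n = "Dragon"
            · subst h6; decide
            · by_cases h7 : n = "Valkyrie"
              · subst h7; decide
              · by_cases h8 : n = "Musketeer"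
                · subst h8; decide
                · by_cases h9 : n = "Giant"
                  · subst h9; decide
                  · by_cases h10 : n = "Prince"
                    · subst h10; decide
                    · by_cases h11 : n = "Balloon"
                      · subst h11; decide
                      · by_cases h12 : n = "Wizard"
                        · subst h12; decide
                        · simp [pvPOINTS, pvStep, h1, h2, h3, h4, h5, h6, h7, h8, h9, h10, h11, h12]

-- B equals the per-name sum, by induction on the list of names
lemma portB_sum (names : List String) :
    pvPOINTS.foldl (fun s p => s + p.2 * ((PySem.Dict.counter names).getD p.1 0)) 0
      = (names.map pvStep).sum := by
  rw [PySem.List.foldl_add]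
  simp only [PySem.Dict.getD_counter, zero_add]
  induction names with
  | nil => simp
  | cons n ns ih =>
    have hstep : (fun p : String × Int => p.2 * ((List.count p.1 (n :: ns) : Nat) : Int))
        = fun p => p.2 * ((List.count p.1 ns : Nat) : Int)
            + p.2 * (if n = p.1 then (1:Int) else 0) := by
      funext p
      by_cases h : n = p.1
      · simp [h]; ring
      · simp [h]
    rw [hstep, PySem.List.sum_map_add_int, ih, table_indicator, List.map_cons, List.sum_cons]
    omega

-- ===== VERDICT (by name: the statement is the Claim_ definition above) =====
theorem calculate_initial_score_spec : Claim_equal_calculate_initial_score := by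
  intro troops _ _
  unfold Spec_calculate_initial_score calculate_initial_score_alt
  rw [counts_eq_counter, portB_sum, portA_eq_sum]
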